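-- pv_equiv track=rewrite | github.com/harika33333/Python-Exercises | Strings_Exercises/strings_5.py | count
-- ===== SOURCE A (Python) =====
-- def count(str1):
--     chars=0
--     digits=0
--     symbols=0
--     for i in str1:
--         if i.isdigit():
--             digits=digits+1
--         elif (i.lower()>="a") and (i.lower()<="z"):
--             chars=chars+1
--         else:
--             symbols=symbols+1
--     s=f"Total counts of chars, digits, and symbols \nChars = {chars}\nDigits = {digits}\nSymbol = {symbols}"
--     return(s)
-- ===== SOURCE B (Python) =====
-- def _tally(s):
--     # divide and conquer: split the string in half, tally each half, merge triples
--     if not s: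
--         return (0, 0, 0)
--     if len(s) == 1:
--         if s.isdigit():
--             return (0, 1, 0)
--         if "a" <= s.lower() <= "z":
--             return (1, 0, 0)
--         return (0, 0, 1)
--     m = len(s) // 2
--     c1, d1, y1 = _tally(s[:m])
--     c2, d2, y2 = _tally(s[m:])
--     return (c1 + c2, d1 + d2, y1 + y2)
--
-- def count(str1):
--     chars, digits, symbols = _tally(str1)
--     return (f"Total counts of chars, digits, and symbols \nChars = {chars}"
--             f"\nDigits = {digits}\nSymbol = {symbols}")
-- ===== Notes on version B (the rewrite author's own statement) =====
-- stated objective: alternative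
-- what changed: Replaces A's single left-to-right loop with three counters by a divide-and-conquer recursion that splits the string in half, tallies each half into a (chars,digits,symbols) triple and merges the triples.
import Mathlib
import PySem

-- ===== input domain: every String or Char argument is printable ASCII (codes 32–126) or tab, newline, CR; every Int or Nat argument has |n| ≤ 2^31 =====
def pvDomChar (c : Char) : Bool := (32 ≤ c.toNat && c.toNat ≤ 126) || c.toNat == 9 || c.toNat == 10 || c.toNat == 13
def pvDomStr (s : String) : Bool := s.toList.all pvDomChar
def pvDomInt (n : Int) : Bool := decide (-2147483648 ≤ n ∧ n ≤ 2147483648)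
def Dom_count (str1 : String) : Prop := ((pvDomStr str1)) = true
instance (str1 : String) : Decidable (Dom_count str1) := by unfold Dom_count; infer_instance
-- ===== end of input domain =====

-- B replaces A's single three-way-branch tally loop by a divide-and-conquer recursion
-- that halves the string and merges (chars,digits,symbols) triples; objective: alternative decomposition.


-- letter predicate shared by both sources: "a" <= c.lower() <= "z"
def pvIsLet (c : Char) : Bool := decide ('a' ≤ PySem.Chars.lowerChar c) && decide (PySem.Chars.lowerChar c ≤ 'z')

-- the f-string both programs build
def pvFmt (chars digits symbols : Int) : String :=
  "Total counts of chars, digits, and symbols \nChars = " ++ PySem.Int.toStr chars ++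
  "\nDigits = " ++ PySem.Int.toStr digits ++ "\nSymbol = " ++ PySem.Int.toStr symbols

-- ===== PORT A =====
def count (str1 : String) : String :=
  let st := str1.toList.foldl
    (fun (acc : Int × Int × Int) i =>
      if PySem.Chars.isdigit i then (acc.1, acc.2.1 + 1, acc.2.2)
      else if pvIsLet i then (acc.1 + 1, acc.2.1, acc.2.2)
      else (acc.1, acc.2.1, acc.2.2 + 1))
    (0, 0, 0)
  pvFmt st.1 st.2.1 st.2.2

-- ===== PORT B =====
-- _tally of Source B; s[:m] / s[m:] with 0 ≤ m ≤ len s are List.take m / List.drop m (exact here);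
-- pvMerge is Source B's componentwise merge of the two half-tallies
def pvMerge (a b : Int × Int × Int) : Int × Int × Int := (a.1 + b.1, a.2.1 + b.2.1, a.2.2 + b.2.2)

def pvTally (l : List Char) : Int × Int × Int :=
  match l with
  | [] => (0, 0, 0)
  | [c] =>
    if PySem.Chars.isdigit c then (0, 1, 0)
    else if pvIsLet c then (1, 0, 0)
    else (0, 0, 1)
  | c1 :: c2 :: rest =>
    pvMerge (pvTally ((c1 :: c2 :: rest).take ((c1 :: c2 :: rest).length / 2)))
            (pvTally ((c1 :: c2 :: rest).drop ((c1 :: c2 :: rest).length / 2)))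
termination_by l.length
decreasing_by
  · simp [List.length_take]; omega
  · simp [List.length_drop]; omega

def count_alt (str1 : String) : String :=
  let t := pvTally str1.toList
  pvFmt t.1 t.2.1 t.2.2

-- ===== PRECONDITION & SPEC =====
def Spec_count (str1 : String) (out : String) : Prop := out = count_alt str1
instance (str1 : String) (out : String) : Decidable (Spec_count str1 out) := by unfold Spec_count; infer_instance

-- ===== CLAIM (what is proved, stated in full; the proofs are below) =====
def Claim_equal_count : Prop := ∀ (str1 : String), Dom_count str1 → Spec_count str1 (count str1)

-- ===== LEMMAS AND PROOFS =====

-- a digit is never in the letter range: lowerChar leaves '0'..'9' unchanged and '9' < 'a'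
theorem pvIsLet_of_isdigit (c : Char) (h : PySem.Chars.isdigit c = true) : pvIsLet c = false := by
  simp [PySem.Chars.isdigit, Char.le_def, UInt32.le_iff_toNat_le] at h
  have hu : PySem.Chars.isupper c = false := by
    simp [PySem.Chars.isupper, Char.le_def, UInt32.le_iff_toNat_le]; omega
  simp [pvIsLet, PySem.Chars.lowerChar, hu, Char.le_def, UInt32.le_iff_toNat_le]
  omega

def pvOther (c : Char) : Bool := !PySem.Chars.isdigit c && !pvIsLet c

-- both algorithms compute the three category counts; each side equals this closed description
theorem pvTally_eq (l : List Char) :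
    pvTally l = ((l.countP pvIsLet : Int), (l.countP PySem.Chars.isdigit : Int),
                 (l.countP pvOther : Int)) := by
  fun_induction pvTally l with
  | case1 => simp
  | case2 c h =>
    have hl := pvIsLet_of_isdigit c h
    simp [h, hl, pvOther]
  | case3 c h hL => simp [h, hL, pvOther]
  | case4 c h hL => simp [h, hL, pvOther]
  | case5 c1 c2 rest iht ihd =>
    simp only [iht, ihd, pvMerge, Prod.ext_iff]
    refine ⟨?_, ?_, ?_⟩ <;>
      · norm_cast
        rw [← List.countP_append, List.take_append_drop]

theorem pvFold_eq (l : List Char) :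
    l.foldl
      (fun (acc : Int × Int × Int) i =>
        if PySem.Chars.isdigit i then (acc.1, acc.2.1 + 1, acc.2.2)
        else if pvIsLet i then (acc.1 + 1, acc.2.1, acc.2.2)
        else (acc.1, acc.2.1, acc.2.2 + 1))
      (0, 0, 0)
    = ((l.countP pvIsLet : Int), (l.countP PySem.Chars.isdigit : Int), (l.countP pvOther : Int)) := by
  suffices h : ∀ (c d s : Int), l.foldl
      (fun (acc : Int × Int × Int) i =>
        if PySem.Chars.isdigit i then (acc.1, acc.2.1 + 1, acc.2.2)
        else if pvIsLet i then (acc.1 + 1, acc.2.1, acc.2.2)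
        else (acc.1, acc.2.1, acc.2.2 + 1))
      (c, d, s)
    = (c + (l.countP pvIsLet : Nat), d + (l.countP PySem.Chars.isdigit : Nat),
       s + (l.countP pvOther : Nat)) by
    simpa using h 0 0 0
  induction l with
  | nil => simp
  | cons a t ih =>
    intro c d s
    by_cases hd : PySem.Chars.isdigit a = true
    · have hl := pvIsLet_of_isdigit a hd
      simp [List.foldl_cons, hd, hl, ih, pvOther, Prod.ext_iff]; omega
    · by_cases hL : pvIsLet a = true
      · simp [List.foldl_cons, hd, hL, ih, pvOther, Prod.ext_iff]; omega
      · simp [List.foldl_cons, hd, hL, ih, pvOther, Prod.ext_iff]; omega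

-- ===== VERDICT (by name: the statement is the Claim_ definition above) =====
theorem count_spec : Claim_equal_count := by
  intro str1 _
  show count str1 = count_alt str1
  simp only [count, count_alt]
  rw [pvFold_eq, pvTally_eq]
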